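-- pv_equiv track=rewrite | github.com/muonium-ai/muonledger | port/python/src/muonledger/parser.py | _consume_sub_directives
-- ===== SOURCE A (Python) =====
-- def _consume_sub_directives(
--     lines: list[str], start: int
-- ) -> tuple[list[tuple[str, str]], int]:
--     """Consume indented sub-directive lines after a block directive.
--
--     Returns a list of (keyword, argument) pairs and the next line index.
--     """
--     sub_directives: list[tuple[str, str]] = []
--     i = start
--     while i < len(lines):
--         sline = lines[i].rstrip("\r\n")
--         if not sline or sline[0] not in " \t":
--             break
--         stripped = sline.lstrip()
--         if not stripped or stripped.startswith(";"):
--             i += 1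
--             continue
--         # Split into keyword and argument
--         parts = stripped.split(None, 1)
--         keyword = parts[0]
--         argument = parts[1] if len(parts) > 1 else ""
--         sub_directives.append((keyword, argument))
--         i += 1
--     return sub_directives, i
-- ===== SOURCE B (Python) =====
-- # Two-pass re-implementation: first find the dedent boundary, then parse the slice.
-- def _is_block_end(line):
--     sline = line.rstrip("\r\n")
--     return (not sline) or sline[0] not in " \t"
--
--
-- def _parse_sub_directive(line):
--     stripped = line.rstrip("\r\n").lstrip()
--     if not stripped or stripped.startswith(";"):
--         return None
--     parts = stripped.split(None, 1)
--     return (parts[0], parts[1] if len(parts) > 1 else "")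
--
--
-- def _consume_sub_directives(lines, start):
--     end = start
--     while end < len(lines) and not _is_block_end(lines[end]):
--         end += 1
--     pairs = [p for p in map(_parse_sub_directive, lines[start:end]) if p is not None]
--     return pairs, end
-- ===== Notes on version B (the rewrite author's own statement) =====
-- stated objective: alternative
-- what changed: Replaces A's single while-loop that interleaves boundary detection, skipping and pair accumulation with a two-pass decomposition: first a boundary scan computes the dedent index end, then the pairs are built by filter-mapping a per-line parser over the slice lines[start:end].
-- outside the precondition, e.g. on _consume_sub_directives([' a'], -1): A returns ([('a', ''), ('a', '')], 1), B returns ([('a', '')], 1)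
import Mathlib
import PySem

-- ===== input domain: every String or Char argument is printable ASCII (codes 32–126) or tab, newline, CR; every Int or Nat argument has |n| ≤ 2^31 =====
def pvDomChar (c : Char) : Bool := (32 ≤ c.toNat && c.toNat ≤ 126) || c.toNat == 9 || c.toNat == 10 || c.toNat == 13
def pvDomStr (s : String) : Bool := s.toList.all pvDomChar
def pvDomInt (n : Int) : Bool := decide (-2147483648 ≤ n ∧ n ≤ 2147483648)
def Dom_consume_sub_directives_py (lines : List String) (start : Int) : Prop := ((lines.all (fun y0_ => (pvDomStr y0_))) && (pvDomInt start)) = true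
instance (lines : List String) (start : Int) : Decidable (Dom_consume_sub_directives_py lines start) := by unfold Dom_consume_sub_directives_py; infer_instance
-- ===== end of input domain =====

-- B separates boundary detection from parsing: it first finds the dedent index, then parses the
-- slice lines[start:end] with a per-line helper (alternative decomposition, same cost).


-- ===== PORT A =====
-- s.rstrip("\r\n"): drop trailing '\r'/'\n' characters; exact hand-port (PySem has no right-only stripChars)
def pvRstripNL (cs : List Char) : List Char :=
  (cs.reverse.dropWhile (fun c => c == '\r' || c == '\n')).reverse

-- the while-loop of A, carrying the accumulator and the index
def pvALoop (lines : List String) (acc : List (String × String)) (i : Int) :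
    (List (String × String)) × Int :=
  if _h : i < (lines.length : Int) then
    match PySem.List.pyGet? lines i with
    | none => (acc, i)  -- IndexError in Python (negative i below -len); excluded by Pre_
    | some line =>
      let sline := pvRstripNL line.toList
      match sline with
      | [] => (acc, i)  -- 'not sline' → break
      | c :: _ =>
        if c == ' ' || c == '\t' then
          let stripped := PySem.Chars.lstrip sline
          if stripped.isEmpty || PySem.Chars.startswith stripped [';'] then
            pvALoop lines acc (i + 1)  -- blank / comment → continue
          else
            let parts := PySem.Chars.split₀Max stripped 1
            pvALoop lines
              (acc ++ [(String.ofList (parts.headD []), String.ofList ((parts.drop 1).headD []))])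
              (i + 1)
        else (acc, i)  -- sline[0] not in " \t" → break
  else (acc, i)
termination_by ((lines.length : Int) - i).toNat
decreasing_by all_goals omega

def consume_sub_directives_py (lines : List String) (start : Int) :
    (List (String × String)) × Int :=
  pvALoop lines [] start

-- ===== PORT B =====
def pvIsBlockEnd (line : String) : Bool :=
  match pvRstripNL line.toList with
  | [] => true
  | c :: _ => !(c == ' ' || c == '\t')

def pvParseSub? (line : String) : Option (String × String) :=
  let stripped := PySem.Chars.lstrip (pvRstripNL line.toList)
  if stripped.isEmpty || PySem.Chars.startswith stripped [';'] then none
  else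
    let parts := PySem.Chars.split₀Max stripped 1
    some (String.ofList (parts.headD []), String.ofList ((parts.drop 1).headD []))

-- the boundary loop of B: advance end while the line is an indented (non-dedent) line
def pvEnd (lines : List String) (e : Int) : Int :=
  if _h : e < (lines.length : Int) then
    match PySem.List.pyGet? lines e with
    | none => e  -- IndexError in Python; excluded by Pre_
    | some line => if pvIsBlockEnd line then e else pvEnd lines (e + 1)
  else e
termination_by ((lines.length : Int) - e).toNat
decreasing_by omega

def consume_sub_directives_py_alt (lines : List String) (start : Int) :
    (List (String × String)) × Int :=
  let e := pvEnd lines start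
  ((PySem.List.slice lines (some start) (some e)).filterMap pvParseSub?, e)

-- ===== PRECONDITION & SPEC =====
-- Pre_ restricts to the function's natural domain of non-negative start indices: a negative start
-- makes A index from the end of the list (raising IndexError when start < -len), an accident of
-- Python's negative indexing that no caller relies on; B's slice semantics differ there.
def Pre_consume_sub_directives_py (lines : List String) (start : Int) : Prop := 0 ≤ start
instance (lines : List String) (start : Int) : Decidable (Pre_consume_sub_directives_py lines start) := by
  unfold Pre_consume_sub_directives_py; infer_instance

def pvWitness_consume_sub_directives_py : List String × Int := ([" kw arg", " ;c", "end"], 0)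

def Spec_consume_sub_directives_py (lines : List String) (start : Int)
    (out : (List (String × String)) × Int) : Prop := out = consume_sub_directives_py_alt lines start
instance (lines : List String) (start : Int) (out : (List (String × String)) × Int) :
    Decidable (Spec_consume_sub_directives_py lines start out) := by
  unfold Spec_consume_sub_directives_py; infer_instance

-- ===== CLAIM (what is proved, stated in full; the proofs are below) =====
def Claim_equal_consume_sub_directives_py : Prop := ∀ (lines : List String) (start : Int), Dom_consume_sub_directives_py lines start → Pre_consume_sub_directives_py lines start → Spec_consume_sub_directives_py lines start (consume_sub_directives_py lines start)

-- ===== LEMMAS AND PROOFS =====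

-- the boundary index never moves backwards
lemma pvEnd_ge (lines : List String) (e : Int) : e ≤ pvEnd lines e := by
  rw [pvEnd]
  split
  · split
    · exact le_refl _
    · split
      · exact le_refl _
      · have := pvEnd_ge lines (e + 1)
        omega
  · exact le_refl _
termination_by ((lines.length : Int) - e).toNat
decreasing_by omega

-- taking one indented line off the front of the slice
lemma pvSlice_cons (lines : List String) (i e : Int) (h0 : 0 ≤ i)
    (hlt : i < (lines.length : Int)) (he : i + 1 ≤ e) :
    PySem.List.slice lines (some i) (some e) =
      lines[i.toNat]'(by omega) :: PySem.List.slice lines (some (i + 1)) (some e) := by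
  rw [PySem.List.slice_toNat _ h0 (by omega), PySem.List.slice_toNat _ (by omega) (by omega)]
  have hd : lines.drop i.toNat = lines[i.toNat]'(by omega) :: lines.drop (i.toNat + 1) :=
    List.drop_eq_getElem_cons (by omega)
  rw [hd]
  have h1 : (i + 1).toNat = i.toNat + 1 := by omega
  have h2 : e.toNat - i.toNat = (e.toNat - (i + 1).toNat) + 1 := by omega
  rw [h2, List.take_succ_cons, h1]

-- main invariant: the A-loop from index i equals acc ++ the parsed slice up to the boundary
lemma pvMain (lines : List String) (acc : List (String × String)) (i : Int) (h0 : 0 ≤ i) :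
    pvALoop lines acc i =
      (acc ++ (PySem.List.slice lines (some i) (some (pvEnd lines i))).filterMap pvParseSub?,
       pvEnd lines i) := by
  rw [pvALoop, pvEnd]
  split
  · rename_i hlt
    have hget : PySem.List.pyGet? lines i = some (lines[i.toNat]'(by omega)) :=
      PySem.List.pyGet?_eq_some_getElem lines h0 hlt
    rw [hget]
    simp only
    have hend_ge := pvEnd_ge lines (i + 1)
    -- case on the first character of the rstripped line
    rcases hsl : pvRstripNL (lines[i.toNat]'(by omega)).toList with _ | ⟨c, rest⟩
    · -- truly empty line: break; the boundary also stops here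
      have : pvIsBlockEnd (lines[i.toNat]'(by omega)) = true := by
        simp [pvIsBlockEnd, hsl]
      rw [this]
      simp only [if_true]
      rw [PySem.List.slice_toNat _ h0 h0]
      simp
    · by_cases hc : (c == ' ' || c == '\t') = true
      · -- indented line: both loops step to i + 1
        have : pvIsBlockEnd (lines[i.toNat]'(by omega)) = false := by
          simp only [pvIsBlockEnd, hsl, hc]; rfl
        rw [this]
        simp only [hc, if_true, Bool.false_eq_true, if_false]
        have hcons := pvSlice_cons lines i (pvEnd lines (i + 1)) h0 hlt (by omega)
        by_cases hskip : ((PySem.Chars.lstrip (c :: rest)).isEmpty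
            || PySem.Chars.startswith (PySem.Chars.lstrip (c :: rest)) [';']) = true
        · -- blank / comment line: skipped by both
          rw [hskip]
          simp only [if_true]
          have hnone : pvParseSub? (lines[i.toNat]'(by omega)) = none := by
            simp only [pvParseSub?, hsl, hskip]; rfl
          rw [pvMain lines acc (i + 1) (by omega), hcons]
          simp [hnone]
        · -- real sub-directive: both produce the same (keyword, argument) pair
          rw [eq_false_of_ne_true hskip]
          simp only [Bool.false_eq_true, if_false]
          have hsome : pvParseSub? (lines[i.toNat]'(by omega)) =
              some (String.ofList ((PySem.Chars.split₀Max (PySem.Chars.lstrip (c :: rest)) 1).headD []),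
                    String.ofList (((PySem.Chars.split₀Max (PySem.Chars.lstrip (c :: rest)) 1).drop 1).headD [])) := by
            simp only [pvParseSub?, hsl, eq_false_of_ne_true hskip]; rfl
          rw [pvMain lines _ (i + 1) (by omega), hcons]
          simp [hsome]
      · -- dedented line: break; the boundary also stops here
        have : pvIsBlockEnd (lines[i.toNat]'(by omega)) = true := by
          simp only [pvIsBlockEnd, hsl]
          simp at hc ⊢
          exact hc
        rw [this]
        simp only [eq_false_of_ne_true hc, Bool.false_eq_true, if_false, if_true]
        rw [PySem.List.slice_toNat _ h0 h0]
        simp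
  · -- i ≥ len: both return immediately with index i
    rw [PySem.List.slice_toNat _ h0 h0]
    simp
termination_by ((lines.length : Int) - i).toNat
decreasing_by all_goals omega

-- ===== VERDICT (by name: the statement is the Claim_ definition above) =====
theorem consume_sub_directives_py_spec : Claim_equal_consume_sub_directives_py := by
  intro lines start _ hpre
  unfold Spec_consume_sub_directives_py consume_sub_directives_py consume_sub_directives_py_alt
  rw [pvMain lines [] start hpre]
  simp
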